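-- pv_equiv track=rewrite | github.com/Athe-kunal/Stanford-cs336-learning | stanford-cs336/assignment-1/tokenizer.py | replace_all_subsequences
-- ===== SOURCE A (Python) =====
-- def replace_all_subsequences(
--     a: tuple[int, ...], b: tuple[int, ...], curr_max_vocab: int
-- ) -> tuple[int, ...]:
--     if not b:
--         return a
--     n, m = len(a), len(b)
--     result = []
--     i = 0
--     while i <= n - m:
--         if a[i : i + m] == b:
--             result.append(curr_max_vocab)
--             i += m
--         else:
--             result.append(a[i])
--             i += 1
--     result.extend(a[i:])
--     return tuple(result)
-- ===== SOURCE B (Python) =====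
-- def replace_all_subsequences(
--     a: tuple[int, ...], b: tuple[int, ...], curr_max_vocab: int
-- ) -> tuple[int, ...]:
--     if not b:
--         return a
--     m = len(b)
--     # KMP prefix function for b
--     pi = [0] * m
--     for k in range(1, m):
--         q = pi[k - 1]
--         while q > 0 and b[k] != b[q]:
--             q = pi[q - 1]
--         pi[k] = q + 1 if b[k] == b[q] else 0
--     # one linear scan over a, collecting greedy non-overlapping match starts
--     starts = []
--     q = 0
--     for i, x in enumerate(a):
--         while q > 0 and b[q] != x:
--             q = pi[q - 1]
--         q = q + 1 if b[q] == x else 0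
--         if q == m:
--             starts.append(i + 1 - m)
--             q = 0
--     # rebuild the output from the match starts
--     out = []
--     i = 0
--     for s in starts:
--         out.extend(a[i:s])
--         out.append(curr_max_vocab)
--         i = s + m
--     out.extend(a[i:])
--     return tuple(out)
-- ===== Notes on version B (the rewrite author's own statement) =====
-- stated objective: alternative
-- what changed: Replaces the naive slide-and-compare-slices loop by Knuth-Morris-Pratt matching: build the prefix-function table for b, do one scan over a collecting greedy non-overlapping match starts, then rebuild the output from those starts (worst-case-linear matching, but interpreter overhead means no measured speedup).
import Mathlib
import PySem

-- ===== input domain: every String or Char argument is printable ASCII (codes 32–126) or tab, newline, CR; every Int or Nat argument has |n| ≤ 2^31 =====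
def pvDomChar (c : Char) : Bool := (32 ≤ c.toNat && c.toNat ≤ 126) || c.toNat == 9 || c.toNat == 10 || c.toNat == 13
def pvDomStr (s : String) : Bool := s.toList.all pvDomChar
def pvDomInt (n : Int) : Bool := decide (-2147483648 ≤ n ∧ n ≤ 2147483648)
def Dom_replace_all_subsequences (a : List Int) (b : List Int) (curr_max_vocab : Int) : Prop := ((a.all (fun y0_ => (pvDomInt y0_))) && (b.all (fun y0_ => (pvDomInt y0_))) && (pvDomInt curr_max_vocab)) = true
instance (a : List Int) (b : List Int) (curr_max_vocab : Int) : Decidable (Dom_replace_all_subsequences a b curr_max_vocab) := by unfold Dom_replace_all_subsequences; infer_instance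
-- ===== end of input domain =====

-- B re-implements A's slide-and-compare-slices loop as Knuth–Morris–Pratt matching (prefix
-- table, one scan collecting greedy non-overlapping match starts, then a rebuild); objective:
-- alternative algorithm (not measured faster).

-- ===== PORT A =====
-- `while i <= n - m` over Python ints (with i ≥ 0) is exactly `i + m ≤ n`; `a[i]` is then in
-- range, so `a.getD i 0` is exact for it.  `hb : b ≠ []` records the caller's guard (Python
-- enters the loop only after `if not b: return a`) and is used only for termination.
def pvA_loop (a b : List Int) (hb : b ≠ []) (c : Int) (i : Nat) (result : List Int) : List Int :=
  if i + b.length ≤ a.length then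
    if PySem.List.slice a (some (i : Int)) (some ((i : Int) + (b.length : Int))) = b then
      pvA_loop a b hb c (i + b.length) (result ++ [c])
    else
      pvA_loop a b hb c (i + 1) (result ++ [a.getD i 0])
  else
    result ++ PySem.List.slice a (some (i : Int)) none
termination_by a.length - i
decreasing_by
  · have := List.length_pos_of_ne_nil hb; omega
  · have := List.length_pos_of_ne_nil hb; omega

def replace_all_subsequences (a : List Int) (b : List Int) (curr_max_vocab : Int) : List Int :=
  if hb : b = [] then a
  else pvA_loop a b hb curr_max_vocab 0 []

-- ===== PORT B =====
-- `while q > 0 and b[q] != x: q = pi[q-1]`.  The inner `if q' < q` is a totality guard only: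
-- for a real prefix-function table pi[q-1] ≤ q-1 < q, so the guard always holds.
def pvB_fall (pi : List Nat) (b : List Int) (x : Int) (q : Nat) : Nat :=
  if 0 < q ∧ b.getD q 0 ≠ x then
    let q' := pi.getD (q - 1) 0
    if _h : q' < q then pvB_fall pi b x q' else q'
  else q
termination_by q

-- `q = q + 1 if b[q] == x else 0` after the fall loop
def pvB_step (pi : List Nat) (b : List Int) (x : Int) (q : Nat) : Nat :=
  let q1 := pvB_fall pi b x q
  if b.getD q1 0 = x then q1 + 1 else 0

-- `for k in range(1, m): ... pi[k] = ...` building the prefix table left to right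
def pvB_piGo (b : List Int) (m : Nat) (pi : List Nat) (k : Nat) : List Nat :=
  if k < m then
    pvB_piGo b m (pi ++ [pvB_step pi b (b.getD k 0) (pi.getD (k - 1) 0)]) (k + 1)
  else pi
termination_by m - k

-- `for i, x in enumerate(a): ...` collecting greedy non-overlapping match starts
def pvB_scanGo (pi : List Nat) (b : List Int) (m : Nat) : List Int → Nat → Nat → List Nat → List Nat
  | [], _, _, starts => starts
  | x :: s, i, q, starts =>
    let q1 := pvB_step pi b x q
    if q1 = m then pvB_scanGo pi b m s (i + 1) 0 (starts ++ [i + 1 - m])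
    else pvB_scanGo pi b m s (i + 1) q1 starts

-- `for s in starts: out += a[i:s]; out.append(tok); i = s + m` and the final `out += a[i:]`
def pvB_rebuild (a : List Int) (c : Int) (m : Nat) : List Nat → Nat → List Int
  | [], i => PySem.List.slice a (some (i : Int)) none
  | s :: rest, i =>
    PySem.List.slice a (some (i : Int)) (some (s : Int)) ++ c :: pvB_rebuild a c m rest (s + m)

def replace_all_subsequences_alt (a : List Int) (b : List Int) (curr_max_vocab : Int) : List Int :=
  if b = [] then a
  else
    let m := b.length
    let pi := pvB_piGo b m [0] 1
    pvB_rebuild a curr_max_vocab m (pvB_scanGo pi b m a 0 0 []) 0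

-- ===== PRECONDITION & SPEC =====
def Spec_replace_all_subsequences (a : List Int) (b : List Int) (curr_max_vocab : Int) (out : List Int) : Prop := out = replace_all_subsequences_alt a b curr_max_vocab
instance (a : List Int) (b : List Int) (curr_max_vocab : Int) (out : List Int) : Decidable (Spec_replace_all_subsequences a b curr_max_vocab out) := by unfold Spec_replace_all_subsequences; infer_instance

-- ===== CLAIM (what is proved, stated in full; the proofs are below) =====
def Claim_equal_replace_all_subsequences : Prop := ∀ (a : List Int) (b : List Int) (curr_max_vocab : Int), Dom_replace_all_subsequences a b curr_max_vocab → Spec_replace_all_subsequences a b curr_max_vocab (replace_all_subsequences a b curr_max_vocab)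

-- ===== LEMMAS AND PROOFS =====

-- The common specification both ports are reduced to: greedy left-to-right replacement.
def pvRepl (b : List Int) (c : Int) (w : List Int) : List Int :=
  if h : b ≠ [] ∧ b <+: w then c :: pvRepl b c (w.drop b.length)
  else
    match w with
    | [] => []
    | x :: t => x :: pvRepl b c t
termination_by w.length
decreasing_by
  · have hb := List.length_pos_of_ne_nil h.1
    have := h.2.length_le
    simp; omega
  · simp

-- index of the first occurrence of b as a contiguous block of w
def pvFirstOcc (b : List Int) : List Int → Option Nat
  | [] => none
  | x :: t => if b <+: (x :: t) then some 0 else (pvFirstOcc b t).map (· + 1)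

lemma pvFirstOcc_some_ne_nil {b w : List Int} {j : Nat} (h : pvFirstOcc b w = some j) : w ≠ [] := by
  intro hw; subst hw; simp [pvFirstOcc] at h

-- greedy non-overlapping match starts of b in w
def pvGreedy (b : List Int) (w : List Int) : List Nat :=
  if hb : b = [] then []
  else
    match h : pvFirstOcc b w with
    | none => []
    | some j => j :: (pvGreedy b (w.drop (j + b.length))).map (· + (j + b.length))
termination_by w.length
decreasing_by
  have h1 := List.length_pos_of_ne_nil hb
  have h2 := List.length_pos_of_ne_nil (pvFirstOcc_some_ne_nil h)
  simp; omega

-- "q is the length of the longest prefix of b that is a suffix of T"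
def pvML (b T : List Int) (q : Nat) : Prop :=
  q ≤ b.length ∧ b.take q <:+ T ∧ ∀ j, j ≤ b.length → b.take j <:+ T → j ≤ q

-- "entry k of the table is the longest proper border of b.take (k+1)" (phrased on the tail)
def pvPiAt (pi : List Nat) (b : List Int) (k : Nat) : Prop :=
  pi.getD k 0 ≤ k ∧ pvML b ((b.drop 1).take k) (pi.getD k 0)

-- no occurrence of b as a contiguous block of T
def pvNoOcc (b T : List Int) : Prop := ∀ j : Nat, ¬ b <+: T.drop j

lemma pv_suffix_of_suffix_le {α : Type} {u v w : List α} (hu : u <:+ w) (hv : v <:+ w)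
    (h : u.length ≤ v.length) : u <:+ v := by
  rw [← List.reverse_prefix] at hu hv ⊢
  exact List.prefix_of_prefix_length_le hu hv (by simpa using h)

lemma pv_take_succ {b : List Int} {j : Nat} (h : j < b.length) :
    b.take (j + 1) = b.take j ++ [b.getD j 0] := by
  rw [List.take_add_one, List.getElem?_eq_getElem h, List.getD_eq_getElem b 0 h]
  rfl

lemma pv_suffix_snoc {u T : List Int} {y x : Int} (h : u ++ [y] <:+ T ++ [x]) :
    y = x ∧ u <:+ T := by
  obtain ⟨p, hp⟩ := h
  rw [← List.append_assoc] at hp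
  have := List.append_inj' hp (by simp)
  exact ⟨by simpa using this.2, ⟨p, this.1⟩⟩

lemma pv_suffix_snoc_intro {u T : List Int} {x : Int} (h : u <:+ T) :
    u ++ [x] <:+ T ++ [x] := by
  obtain ⟨p, hp⟩ := h
  exact ⟨p, by rw [← List.append_assoc, hp]⟩

lemma pv_border_bridge {b : List Int} {q j : Nat} (hq : 0 < q) (hqm : q ≤ b.length)
    (hj : j ≤ q - 1) : (b.take j <:+ (b.drop 1).take (q - 1)) ↔ b.take j <:+ b.take q := by
  have htail : (b.take q).drop 1 = (b.drop 1).take (q - 1) := by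
    rw [List.drop_take]
  constructor
  · intro h
    rw [← htail] at h
    exact h.trans (List.drop_suffix _ _)
  · intro h
    rw [← htail]
    apply pv_suffix_of_suffix_le h (List.drop_suffix _ _)
    simp
    omega

lemma pvB_fall_eq_self {pi : List Nat} {b : List Int} {x : Int} {q : Nat}
    (h : ¬(0 < q ∧ b.getD q 0 ≠ x)) : pvB_fall pi b x q = q := by
  rw [pvB_fall]; simp only [if_neg h]

lemma pvB_fall_eq_of {pi : List Nat} {b : List Int} {x : Int} {q : Nat}
    (hq : 0 < q) (hne : b.getD q 0 ≠ x) (hlt : pi.getD (q - 1) 0 < q) :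
    pvB_fall pi b x q = pvB_fall pi b x (pi.getD (q - 1) 0) := by
  rw [pvB_fall]; simp only [if_pos (And.intro hq hne)]; simp only [dif_pos hlt]

lemma pvFall_spec (pi : List Nat) (b : List Int) (x : Int) :
    ∀ q : Nat, (∀ k, k < q → pvPiAt pi b k) → q ≤ b.length →
      pvB_fall pi b x q ≤ q ∧ b.take (pvB_fall pi b x q) <:+ b.take q ∧
      (b.getD (pvB_fall pi b x q) 0 = x ∨ pvB_fall pi b x q = 0) ∧
      (∀ j, j ≤ q → b.take j <:+ b.take q → b.getD j 0 = x → j ≤ pvB_fall pi b x q) := by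
  intro q
  induction q using Nat.strong_induction_on with
  | _ q IH =>
    intro Hpi hqb
    by_cases hc : 0 < q ∧ b.getD q 0 ≠ x
    · obtain ⟨hq, hne⟩ := hc
      have hpi1 := Hpi (q - 1) (by omega)
      simp only [pvPiAt, pvML] at hpi1
      obtain ⟨hle, _, hsf, hmax⟩ := hpi1
      set q' := pi.getD (q - 1) 0 with hq'
      have hlt : q' < q := by omega
      rw [pvB_fall_eq_of hq hne hlt, ← hq']
      obtain ⟨h1, h2, h3, h4⟩ := IH q' hlt (fun k hk => Hpi k (by omega)) (by omega)
      have hq'q : b.take q' <:+ b.take q := by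
        rw [← pv_border_bridge hq hqb (by omega)]
        exact hsf
      refine ⟨by omega, h2.trans hq'q, h3, ?_⟩
      intro j hj hsuf hx
      have hjq : j ≠ q := fun h => hne (h ▸ hx)
      have hjq' : j ≤ q' := hmax j (by omega) (by rw [pv_border_bridge hq hqb (by omega)]; exact hsuf)
      have hlen : (b.take j).length ≤ (b.take q').length := by
        simp only [List.length_take]
        omega
      exact h4 j hjq' (pv_suffix_of_suffix_le hsuf hq'q hlen) hx
    · rw [pvB_fall_eq_self hc]
      push Not at hc
      refine ⟨le_refl _, List.suffix_refl _, ?_, fun j hj _ _ => hj⟩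
      by_cases h0 : q = 0
      · right; exact h0
      · left; exact hc (by omega)

lemma pvStep_spec {pi : List Nat} {b : List Int} {x : Int} {T : List Int} {q : Nat}
    (Hpi : ∀ k, k < q → pvPiAt pi b k) (hml : pvML b T q) (hqm : q < b.length) :
    pvML b (T ++ [x]) (pvB_step pi b x q) := by
  have hml' := hml
  simp only [pvML] at hml'
  obtain ⟨hqle, hsuf, hmax⟩ := hml'
  obtain ⟨f1, f2, f3, f4⟩ := pvFall_spec pi b x q Hpi (Nat.le_of_lt hqm)
  simp only [pvML, pvB_step]
  set r := pvB_fall pi b x q with hr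
  have hrT : b.take r <:+ T := f2.trans hsuf
  by_cases hx : b.getD r 0 = x
  · rw [if_pos hx]
    have hrm : r < b.length := by omega
    refine ⟨by omega, ?_, ?_⟩
    · rw [pv_take_succ hrm, hx]
      exact pv_suffix_snoc_intro hrT
    · intro j hj hs
      match j with
      | 0 => exact Nat.zero_le _
      | j' + 1 =>
        have hj' : j' < b.length := by omega
        rw [pv_take_succ hj'] at hs
        obtain ⟨hxx, hsT⟩ := pv_suffix_snoc hs
        have hjq : j' ≤ q := hmax j' (by omega) hsT
        have hlen : (b.take j').length ≤ (b.take q).length := by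
          simp only [List.length_take]; omega
        have := f4 j' hjq (pv_suffix_of_suffix_le hsT hsuf hlen) hxx
        omega
  · rw [if_neg hx]
    have hr0 : r = 0 := by
      rcases f3 with h | h
      · exact absurd h hx
      · exact h
    refine ⟨Nat.zero_le _, by simp, ?_⟩
    intro j hj hs
    match j with
    | 0 => exact Nat.le_refl _
    | j' + 1 =>
      have hj' : j' < b.length := by omega
      rw [pv_take_succ hj'] at hs
      obtain ⟨hxx, hsT⟩ := pv_suffix_snoc hs
      have hjq : j' ≤ q := hmax j' (by omega) hsT
      have hlen : (b.take j').length ≤ (b.take q).length := by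
        simp only [List.length_take]; omega
      have hj0 : j' ≤ r := f4 j' hjq (pv_suffix_of_suffix_le hsT hsuf hlen) hxx
      have hj0' : j' = 0 := by omega
      rw [hj0'] at hxx
      rw [hr0] at hx
      exact absurd hxx hx

lemma pvML_nil {b : List Int} (hb : b ≠ []) : pvML b [] 0 := by
  refine ⟨Nat.zero_le _, by simp, fun j hj hs => ?_⟩
  have := List.eq_nil_of_suffix_nil hs
  rcases List.take_eq_nil_iff.mp this with h | h
  · omega
  · exact absurd h hb

lemma pvPiGo_spec (b : List Int) (hb : b ≠ []) :
    ∀ n k pi, b.length - k ≤ n → 1 ≤ k → pi.length = k → k ≤ b.length →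
      (∀ j, j < k → pvPiAt pi b j) →
      ∀ j, j < b.length → pvPiAt (pvB_piGo b b.length pi k) b j := by
  intro n
  induction n with
  | zero =>
    intro k pi hn h1 hlen hkm Hpi j hj
    rw [pvB_piGo]
    rw [if_neg (by omega : ¬ k < b.length)]
    exact Hpi j (by omega)
  | succ n IH =>
    intro k pi hn h1 hlen hkm Hpi j hj
    rw [pvB_piGo]
    by_cases hk : k < b.length
    · rw [if_pos hk]
      have hpik := Hpi (k - 1) (by omega)
      simp only [pvPiAt] at hpik
      obtain ⟨hqle, hml⟩ := hpik
      have hstep : pvML b ((b.drop 1).take (k - 1) ++ [b.getD k 0])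
          (pvB_step pi b (b.getD k 0) (pi.getD (k - 1) 0)) :=
        pvStep_spec (fun kk hkk => Hpi kk (by omega)) hml (by omega)
      have hdl : k - 1 < (b.drop 1).length := by simp; omega
      have hgd : (b.drop 1).getD (k - 1) 0 = b.getD k 0 := by
        rw [List.getD_eq_getElem _ _ hdl, List.getD_eq_getElem _ _ (by omega : k < b.length)]
        rw [List.getElem_drop]
        congr 1
        omega
      have hT : (b.drop 1).take (k - 1) ++ [b.getD k 0] = (b.drop 1).take k := by
        rw [← hgd, ← pv_take_succ hdl]
        congr 1
        omega
      rw [hT] at hstep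
      set v := pvB_step pi b (b.getD k 0) (pi.getD (k - 1) 0) with hv
      have hvk : v ≤ k := by
        have h2 := hstep.2.1.length_le
        have h1' := hstep.1
        simp only [List.length_take, List.length_drop] at h2
        omega
      apply IH (k + 1) (pi ++ [v]) (by omega) (by omega) (by simp [hlen]) (by omega) ?_ j hj
      intro jj hjj
      by_cases hjk : jj < k
      · have hpre := Hpi jj hjk
        simp only [pvPiAt] at hpre ⊢
        rw [List.getD_append _ _ _ _ (by omega)]
        exact hpre
      · have hjjk : jj = k := by omega
        subst hjjk
        have hget : (pi ++ [v]).getD jj 0 = v := by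
          rw [← hlen]
          simp [List.getD_eq_getElem?_getD]
        simp only [pvPiAt, hget]
        exact ⟨hvk, hstep⟩
    · rw [if_neg hk]
      exact Hpi j (by omega)

lemma pvPi_spec (b : List Int) (hb : b ≠ []) :
    ∀ j, j < b.length → pvPiAt (pvB_piGo b b.length [0] 1) b j := by
  apply pvPiGo_spec b hb (b.length - 1) 1 [0] (by omega) (by omega) rfl
    (List.length_pos_of_ne_nil hb)
  intro j hj
  have : j = 0 := by omega
  subst this
  simp only [pvPiAt]
  refine ⟨by simp, ?_⟩
  simpa using pvML_nil hb

lemma pvP_to_noOcc {b T : List Int} (hP : ∀ u, u <+: T → ¬ b <:+ u) : pvNoOcc b T := by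
  intro j hocc
  obtain ⟨r, hr⟩ := hocc
  apply hP (T.take j ++ b) ⟨r, ?_⟩ ⟨T.take j, rfl⟩
  rw [List.append_assoc, hr, List.take_append_drop]

lemma pvNoOcc_firstOcc {b T : List Int} (hb : b ≠ []) (h : pvNoOcc b T) :
    pvFirstOcc b T = none := by
  induction T with
  | nil => simp [pvFirstOcc]
  | cons x t IH =>
    rw [pvFirstOcc, if_neg (by simpa using h 0)]
    rw [IH (fun j => by simpa using h (j + 1))]
    rfl

lemma pvFirstOcc_none_noOcc {b T : List Int} (hb : b ≠ []) (h : pvFirstOcc b T = none) :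
    pvNoOcc b T := by
  induction T with
  | nil =>
    intro j hocc
    simp only [List.drop_nil] at hocc
    exact hb (List.prefix_nil.mp hocc)
  | cons x t IH =>
    rw [pvFirstOcc] at h
    by_cases hp : b <+: x :: t
    · rw [if_pos hp] at h; simp at h
    · rw [if_neg hp] at h
      have hft : pvFirstOcc b t = none := by
        cases hft : pvFirstOcc b t with
        | none => rfl
        | some jj => rw [hft] at h; simp at h
      intro j hocc
      match j with
      | 0 => exact hp (by simpa using hocc)
      | j' + 1 => exact IH hft j' (by simpa using hocc)

lemma pvRepl_cons_neg {b : List Int} {c : Int} {x : Int} {t : List Int}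
    (h : ¬ b <+: x :: t) : pvRepl b c (x :: t) = x :: pvRepl b c t := by
  rw [pvRepl]; simp [h]

lemma pvRepl_id {b : List Int} {c : Int} {T : List Int} (h : pvNoOcc b T) :
    pvRepl b c T = T := by
  induction T with
  | nil => rw [pvRepl]; simp
  | cons x t IH =>
    rw [pvRepl_cons_neg (by simpa using h 0)]
    rw [IH (fun j => by simpa using h (j + 1))]

lemma pvRepl_short {b : List Int} {c : Int} {w : List Int} (h : w.length < b.length) :
    pvRepl b c w = w := by
  induction w with
  | nil => rw [pvRepl]; simp
  | cons x t IH =>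
    have hlen : t.length + 1 < b.length := by simpa using h
    have hp : ¬ b <+: x :: t := by
      intro hpre
      have := hpre.length_le
      simp only [List.length_cons] at this
      omega
    rw [pvRepl_cons_neg hp, IH (by omega)]

lemma pvFirstOcc_intro {b : List Int} (hb : b ≠ []) :
    ∀ (j : Nat) (w : List Int), b <+: w.drop j → (∀ j', j' < j → ¬ b <+: w.drop j') →
      pvFirstOcc b w = some j := by
  intro j
  induction j with
  | zero =>
    intro w hocc hmin
    cases w with
    | nil => exact absurd (List.prefix_nil.mp (by simpa using hocc)) hb
    | cons x t => rw [pvFirstOcc, if_pos (by simpa using hocc)]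
  | succ j IH =>
    intro w hocc hmin
    cases w with
    | nil => exact absurd (List.prefix_nil.mp (by simpa using hocc)) hb
    | cons x t =>
      rw [pvFirstOcc, if_neg (by simpa using hmin 0 (by omega))]
      rw [IH t (by simpa using hocc) (fun j' hj' => by simpa using hmin (j' + 1) (by omega))]
      rfl

lemma pvRepl_first {b : List Int} {c : Int} (hb : b ≠ []) :
    ∀ (j : Nat) (w : List Int), pvFirstOcc b w = some j →
      pvRepl b c w = w.take j ++ c :: pvRepl b c (w.drop (j + b.length)) := by
  intro j
  induction j with
  | zero =>
    intro w h
    cases w with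
    | nil => simp [pvFirstOcc] at h
    | cons x t =>
      rw [pvFirstOcc] at h
      by_cases hp : b <+: x :: t
      · rw [pvRepl, dif_pos ⟨hb, hp⟩]
        simp
      · rw [if_neg hp] at h
        cases hft : pvFirstOcc b t with
        | none => rw [hft] at h; simp at h
        | some jj => rw [hft] at h; simp at h
  | succ j IH =>
    intro w h
    cases w with
    | nil => simp [pvFirstOcc] at h
    | cons x t =>
      rw [pvFirstOcc] at h
      by_cases hp : b <+: x :: t
      · rw [if_pos hp] at h; simp at h
      · rw [if_neg hp] at h
        cases hft : pvFirstOcc b t with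
        | none => rw [hft] at h; simp at h
        | some jj =>
          rw [hft] at h
          simp at h
          rw [h] at hft
          rw [pvRepl_cons_neg hp, IH t hft]
          rw [show j + 1 + b.length = (j + b.length) + 1 by omega]
          simp

lemma pvGreedy_none {b w : List Int} (hb : b ≠ []) (h : pvFirstOcc b w = none) :
    pvGreedy b w = [] := by
  rw [pvGreedy, dif_neg hb]
  split <;> simp_all

lemma pvGreedy_some {b w : List Int} {j : Nat} (hb : b ≠ []) (h : pvFirstOcc b w = some j) :
    pvGreedy b w = j :: (pvGreedy b (w.drop (j + b.length))).map (· + (j + b.length)) := by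
  rw [pvGreedy, dif_neg hb]
  split
  · simp_all
  · rename_i j' h'
    rw [h'] at h
    injection h with h
    subst h
    rfl

lemma pvScan_eq (pi : List Nat) (b : List Int) (hb : b ≠ [])
    (Hpi : ∀ k, k < b.length → pvPiAt pi b k) :
    ∀ (s T : List Int) (i q : Nat) (starts : List Nat),
      pvML b T q → q < b.length → (∀ u, u <+: T → ¬ b <:+ u) → T.length ≤ i →
      pvB_scanGo pi b b.length s i q starts
        = starts ++ (pvGreedy b (T ++ s)).map (fun j => i - T.length + j) := by
  intro s
  induction s with
  | nil =>
    intro T i q starts hml hq hP hTi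
    rw [List.append_nil, pvGreedy_none hb (pvNoOcc_firstOcc hb (pvP_to_noOcc hP))]
    simp [pvB_scanGo]
  | cons x s' IH =>
    intro T i q starts hml hq hP hTi
    have hm : 0 < b.length := List.length_pos_of_ne_nil hb
    have hml1 : pvML b (T ++ [x]) (pvB_step pi b x q) :=
      pvStep_spec (fun k hk => Hpi k (by omega)) hml hq
    simp only [pvB_scanGo]
    by_cases hq1 : pvB_step pi b x q = b.length
    · rw [if_pos hq1]
      have hsufb : b <:+ T ++ [x] := by
        have h0 := hml1.2.1
        rw [hq1, List.take_length] at h0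
        exact h0
      have hlenTx : b.length ≤ T.length + 1 := by simpa using hsufb.length_le
      have hdropTx : (T ++ [x]).drop (T.length + 1 - b.length) = b := by
        have h0 := List.suffix_iff_eq_drop.mp hsufb
        conv_rhs => rw [h0]
        congr 1
        simp only [List.length_append, List.length_cons, List.length_nil]
      have hocc : b <+: (T ++ x :: s').drop (T.length + 1 - b.length) := by
        rw [show T ++ x :: s' = (T ++ [x]) ++ s' by simp]
        rw [List.drop_append_of_le_length (by simp only [List.length_append, List.length_cons, List.length_nil]; omega), hdropTx]
        exact ⟨s', rfl⟩
      have hmin : ∀ j', j' < T.length + 1 - b.length → ¬ b <+: (T ++ x :: s').drop j' := by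
        intro j' hj' hpre
        have hjm : j' + b.length ≤ T.length := by omega
        rw [List.drop_append_of_le_length (by omega)] at hpre
        have hbT : b <+: T.drop j' := by
          have h0 := List.prefix_iff_eq_take.mp hpre
          rw [List.take_append_of_le_length (by simp only [List.length_drop]; omega)] at h0
          exact h0 ▸ List.take_prefix _ _
        apply hP (T.take (j' + b.length)) (List.take_prefix _ _)
        refine ⟨T.take j', ?_⟩
        rw [List.take_add, ← List.prefix_iff_eq_take.mp hbT]
      have hfo : pvFirstOcc b (T ++ x :: s') = some (T.length + 1 - b.length) :=
        pvFirstOcc_intro hb _ _ hocc hmin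
      rw [IH [] (i + 1) 0 (starts ++ [i + 1 - b.length]) (pvML_nil hb) hm
        (by intro u hu hsu
            rw [List.prefix_nil.mp hu] at hsu
            exact hb (List.suffix_nil.mp hsu))
        (by simp)]
      rw [pvGreedy_some hb hfo]
      rw [show T.length + 1 - b.length + b.length = T.length + 1 by omega]
      rw [show (T ++ x :: s').drop (T.length + 1) = s' by
        rw [show T ++ x :: s' = (T ++ [x]) ++ s' by simp,
          show T.length + 1 = (T ++ [x]).length by simp]
        exact List.drop_left]
      simp only [List.map_cons, List.map_map, List.nil_append, List.append_assoc,
        List.singleton_append, List.length_nil]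
      congr 1
      congr 1
      · omega
      · apply List.map_congr_left
        intro t _
        simp only [Function.comp]
        omega
    · rw [if_neg hq1]
      have hq1m : pvB_step pi b x q < b.length := by
        have := hml1.1
        omega
      have hP' : ∀ u, u <+: T ++ [x] → ¬ b <:+ u := by
        intro u hu hbu
        by_cases hlu : u.length ≤ T.length
        · apply hP u ?_ hbu
          have h0 := List.prefix_iff_eq_take.mp hu
          rw [List.take_append_of_le_length hlu] at h0
          exact h0 ▸ List.take_prefix _ _
        · have hul : u.length = T.length + 1 := by
            have := hu.length_le
            simp at this
            omega
          have huT : u = T ++ [x] := by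
            have h0 := List.prefix_iff_eq_take.mp hu
            rw [hul, show T.length + 1 = (T ++ [x]).length by simp, List.take_length] at h0
            exact h0
          subst huT
          have := hml1.2.2 b.length (Nat.le_refl _) (by rw [List.take_length]; exact hbu)
          omega
      rw [IH (T ++ [x]) (i + 1) _ starts hml1 hq1m hP' (by simp; omega)]
      rw [show (T ++ [x]) ++ s' = T ++ x :: s' by simp]
      congr 1
      apply List.map_congr_left
      intro t _
      simp only [List.length_append, List.length_cons, List.length_nil]
      omega

lemma pvRebuild_eq (b : List Int) (c : Int) (a : List Int) (hb : b ≠ []) :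
    ∀ (n : Nat) (w : List Int) (i0 : Nat), w.length ≤ n → w = a.drop i0 →
      pvB_rebuild a c b.length ((pvGreedy b w).map (· + i0)) i0 = pvRepl b c w := by
  intro n
  induction n with
  | zero =>
    intro w i0 hn hw
    have hwnil : w = [] := List.eq_nil_of_length_eq_zero (by omega)
    subst hwnil
    rw [pvGreedy_none hb (by rfl)]
    simp only [List.map_nil]
    rw [pvB_rebuild, PySem.List.slice_from_natCast, ← hw, pvRepl]
    simp
  | succ n IH =>
    intro w i0 hn hw
    cases hfo : pvFirstOcc b w with
    | none =>
      rw [pvGreedy_none hb hfo]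
      simp only [List.map_nil]
      rw [pvB_rebuild, PySem.List.slice_from_natCast, ← hw,
        pvRepl_id (pvFirstOcc_none_noOcc hb hfo)]
    | some j =>
      have hm := List.length_pos_of_ne_nil hb
      have hwne := pvFirstOcc_some_ne_nil hfo
      have hwl : 0 < w.length := List.length_pos_of_ne_nil hwne
      rw [pvGreedy_some hb hfo]
      simp only [List.map_cons, List.map_map]
      rw [pvB_rebuild]
      have hsl : PySem.List.slice a (some ((i0 : Nat) : Int)) (some ((↑(j + i0) : Int))) = w.take j := by
        rw [PySem.List.slice_natCast, ← hw]
        congr 1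
        omega
      have hrest : (pvGreedy b (w.drop (j + b.length))).map ((· + i0) ∘ (· + (j + b.length)))
          = (pvGreedy b (w.drop (j + b.length))).map (· + (j + i0 + b.length)) := by
        apply List.map_congr_left
        intro t _
        simp only [Function.comp]
        omega
      have hw' : w.drop (j + b.length) = a.drop (j + i0 + b.length) := by
        rw [hw, List.drop_drop]
        congr 1
        omega
      rw [hsl, hrest, IH (w.drop (j + b.length)) (j + i0 + b.length)
        (by simp only [List.length_drop]; omega) hw']
      rw [← pvRepl_first hb j w hfo]

lemma pvA_eq (a b : List Int) (hb : b ≠ []) (c : Int) :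
    ∀ (n : Nat) (i : Nat) (result : List Int), a.length - i ≤ n →
      pvA_loop a b hb c i result = result ++ pvRepl b c (a.drop i) := by
  intro n
  induction n with
  | zero =>
    intro i result hn
    have hm := List.length_pos_of_ne_nil hb
    rw [pvA_loop, if_neg (by omega), PySem.List.slice_from_natCast,
      pvRepl_short (by simp only [List.length_drop]; omega)]
  | succ n IH =>
    intro i result hn
    have hm := List.length_pos_of_ne_nil hb
    rw [pvA_loop]
    by_cases hcond : i + b.length ≤ a.length
    · rw [if_pos hcond]
      have hslice : PySem.List.slice a (some (i : Int)) (some ((i : Int) + (b.length : Int)))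
          = (a.drop i).take b.length := PySem.List.slice_natCast_add a i b.length
      by_cases heq : PySem.List.slice a (some (i : Int)) (some ((i : Int) + (b.length : Int))) = b
      · rw [if_pos heq]
        have hpre : b <+: a.drop i := by
          rw [hslice] at heq
          exact heq ▸ List.take_prefix _ _
        rw [IH (i + b.length) (result ++ [c]) (by omega)]
        rw [show pvRepl b c (a.drop i) = c :: pvRepl b c (a.drop (i + b.length)) by
          rw [pvRepl, dif_pos ⟨hb, hpre⟩, List.drop_drop]]
        simp
      · rw [if_neg heq]
        have hnpre : ¬ b <+: a.drop i := by
          intro hpre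
          apply heq
          rw [hslice]
          exact (List.prefix_iff_eq_take.mp hpre).symm
        have hi : i < a.length := by omega
        rw [IH (i + 1) _ (by omega)]
        have hdrop : a.drop i = a[i] :: a.drop (i + 1) := List.drop_eq_getElem_cons hi
        rw [hdrop] at hnpre
        conv_rhs => rw [hdrop]
        rw [pvRepl_cons_neg hnpre, List.getD_eq_getElem _ _ hi]
        simp
    · rw [if_neg hcond, PySem.List.slice_from_natCast,
        pvRepl_short (by simp only [List.length_drop]; omega)]

lemma pvAlt_eq (a b : List Int) (c : Int) (hb : b ≠ []) :
    replace_all_subsequences_alt a b c = pvRepl b c a := by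
  unfold replace_all_subsequences_alt
  rw [if_neg hb]
  show pvB_rebuild a c b.length
      (pvB_scanGo (pvB_piGo b b.length [0] 1) b b.length a 0 0 []) 0 = pvRepl b c a
  have Hpi := pvPi_spec b hb
  have hscan := pvScan_eq (pvB_piGo b b.length [0] 1) b hb Hpi a [] 0 0 []
    (pvML_nil hb) (List.length_pos_of_ne_nil hb)
    (by intro u hu hsu
        rw [List.prefix_nil.mp hu] at hsu
        exact hb (List.suffix_nil.mp hsu))
    (by simp)
  simp only [List.nil_append, List.length_nil] at hscan
  rw [hscan]
  rw [show (pvGreedy b a).map (fun j => 0 - 0 + j) = (pvGreedy b a).map (· + 0) by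
    apply List.map_congr_left
    intro t _
    omega]
  exact pvRebuild_eq b c a hb a.length a 0 (Nat.le_refl _) (by simp)

-- ===== VERDICT (by name: the statement is the Claim_ definition above) =====
theorem replace_all_subsequences_spec : Claim_equal_replace_all_subsequences := by
  intro a b c _dom
  unfold Spec_replace_all_subsequences
  by_cases hb : b = []
  · subst hb; simp [replace_all_subsequences, replace_all_subsequences_alt]
  · have hA : replace_all_subsequences a b c = pvRepl b c a := by
      unfold replace_all_subsequences
      rw [dif_neg hb]
      have := pvA_eq a b hb c a.length 0 [] (by omega)
      simpa using this
    rw [hA, pvAlt_eq a b c hb]
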